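-- pv_equiv track=rewrite | github.com/PatrickWeaver/python-encryption | sharedKeyEncode.py | keyUnencode
-- ===== SOURCE A (Python) =====
-- def keyUnencode(myEncodedString, myPassword):
--   newString = ""
--   for c in myPassword:
--     if ord(c) > 126:
--       return "Error"
--   count = 0
--   passwordLength = len(myPassword)
--   for c in myEncodedString:
--     intC = ord(c)
--     if intC > 126:
--       return "Error"
--     if intC < 32:
--       return "Error"
--     offset = ord(myPassword[count])
--     newIntC = intC - offset
--     if newIntC < 32:
--       newIntC = newIntC + 95
--       if newIntC < 32:
--         newIntC = newIntC + 95
--     newChar = chr(newIntC)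
--     newString += newChar
--
--     count += 1
--     if count == passwordLength:
--       count = 0
--   return newString
-- ===== SOURCE B (Python) =====
-- def keyUnencode(myEncodedString, myPassword):
--     for c in myPassword:
--         if ord(c) > 126:
--             return "Error"
--     for c in myEncodedString:
--         if not 32 <= ord(c) <= 126:
--             return "Error"
--     # tabula recta: one precomputed 95-entry decode row per password character
--     tables = [[chr(32 + (e - ord(p) - 32) % 95) for e in range(32, 127)]
--               for p in myPassword]
--     out = []
--     for i, c in enumerate(myEncodedString):
--         out.append(tables[i % len(tables)][ord(c) - 32])
--     return "".join(out)
-- ===== Notes on version B (the rewrite author's own statement) =====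
-- stated objective: alternative
-- what changed: B is table-driven: after two staged validation passes it precomputes one 95-entry tabula-recta decode row per password character and decodes by pure table lookups tables[i % len(tables)][ord(c)-32], so the decode loop does no arithmetic on character codes, replacing A's interleaved per-character subtraction with its nested +95 correction cascade and its stateful reset counter.
import Mathlib
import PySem

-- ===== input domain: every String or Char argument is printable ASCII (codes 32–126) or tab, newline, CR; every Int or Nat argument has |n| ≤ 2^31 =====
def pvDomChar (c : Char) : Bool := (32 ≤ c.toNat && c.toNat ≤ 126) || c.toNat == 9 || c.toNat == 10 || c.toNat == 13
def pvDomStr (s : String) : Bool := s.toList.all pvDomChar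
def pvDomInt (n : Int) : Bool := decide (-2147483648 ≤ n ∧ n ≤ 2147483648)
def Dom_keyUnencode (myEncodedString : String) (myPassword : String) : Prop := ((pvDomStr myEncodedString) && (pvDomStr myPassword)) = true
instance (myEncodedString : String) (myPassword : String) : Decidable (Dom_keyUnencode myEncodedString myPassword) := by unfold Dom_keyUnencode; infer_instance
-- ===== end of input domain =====

-- B precomputes one tabula-recta decode row per password character and decodes by
-- table lookups after two staged validation passes (objective: alternative);
-- return values agree on Pre_ (empty-password inputs on which A raises
-- IndexError are excluded).

-- ===== PORT A =====
-- main loop of A: walks the encoded string keeping the running password index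
-- `count` (reset at passwordLength) and the accumulated output characters.
-- `List.getD` models `myPassword[count]`; `count` is always in range when
-- myPassword ≠ "" (the IndexError case is outside Pre_).
def keyUnencodeLoop (pw : List Char) (count : Nat) (acc : List Char) : List Char → String
  | [] => String.mk acc
  | c :: rest =>
    let intC : Int := c.toNat
    if intC > 126 then "Error"
    else if intC < 32 then "Error"
    else
      let offset : Int := (pw.getD count ' ').toNat
      let newIntC := intC - offset
      let newIntC := if newIntC < 32 then
          (if newIntC + 95 < 32 then newIntC + 95 + 95 else newIntC + 95)
        else newIntC
      let count' := count + 1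
      keyUnencodeLoop pw (if count' = pw.length then 0 else count') (acc ++ [Char.ofNat newIntC.toNat]) rest

def keyUnencode (myEncodedString : String) (myPassword : String) : String :=
  if myPassword.toList.any (fun c => decide ((c.toNat : Int) > 126)) then "Error"
  else keyUnencodeLoop myPassword.toList 0 [] myEncodedString.toList

-- ===== PORT B =====
-- one precomputed decode row: [chr(32 + (e - ord(p) - 32) % 95) for e in range(32, 127)]
def bRow (p : Char) : List Char :=
  (PySem.List.pyRange 32 127).map
    (fun e => Char.ofNat (32 + PySem.Int.mod (e - (p.toNat : Int) - 32) 95).toNat)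

-- B: validate the password, validate the encoded string, build the per-password-char
-- tables, then decode by table lookups tables[i % len(tables)][ord(c) - 32].
-- Both indexings are via pyGetD; the validation passes guarantee both indices are
-- in range on every input reaching them, so the defaults are never used.
def keyUnencode_alt (myEncodedString : String) (myPassword : String) : String :=
  if myPassword.toList.any (fun c => decide ((c.toNat : Int) > 126)) then "Error"
  else if myEncodedString.toList.any
      (fun c => !(decide ((32 : Int) ≤ (c.toNat : Int)) && decide ((c.toNat : Int) ≤ 126))) then "Error"
  else
    String.mk ((PySem.List.enumerate myEncodedString.toList).foldl
      (fun acc p => acc ++ [PySem.List.pyGetD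
        (PySem.List.pyGetD (myPassword.toList.map bRow)
          (PySem.Int.mod p.1 ((myPassword.toList.map bRow).length : Int)) [])
        ((p.2.toNat : Int) - 32) ' ']) [])

-- ===== PRECONDITION & SPEC =====
-- Pre_ excludes exactly the inputs where A raises: empty password together with a
-- non-empty encoded string whose first character is in 32..126 (A reaches
-- myPassword[0] → IndexError there; B raises ZeroDivisionError there).
def Pre_keyUnencode (myEncodedString : String) (myPassword : String) : Prop :=
  myPassword ≠ "" ∨
    ((myEncodedString.toList.take 1).all
      (fun c => decide (126 < c.toNat) || decide (c.toNat < 32))) = true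
instance (myEncodedString : String) (myPassword : String) : Decidable (Pre_keyUnencode myEncodedString myPassword) := by unfold Pre_keyUnencode; infer_instance
def pvWitness_keyUnencode : String × String := ("Hi!", "k")

def Spec_keyUnencode (myEncodedString : String) (myPassword : String) (out : String) : Prop := out = keyUnencode_alt myEncodedString myPassword
instance (myEncodedString : String) (myPassword : String) (out : String) : Decidable (Spec_keyUnencode myEncodedString myPassword out) := by unfold Spec_keyUnencode; infer_instance

-- ===== CLAIM (what is proved, stated in full; the proofs are below) =====
def Claim_equal_keyUnencode : Prop := ∀ (myEncodedString : String) (myPassword : String), Dom_keyUnencode myEncodedString myPassword → Pre_keyUnencode myEncodedString myPassword → Spec_keyUnencode myEncodedString myPassword (keyUnencode myEncodedString myPassword)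

-- ===== LEMMAS AND PROOFS =====

-- reference form of the per-character decode with a plain Nat password index
def decChar (pw : List Char) (count : Nat) (c : Char) : Char :=
  Char.ofNat (32 + PySem.Int.mod ((c.toNat : Int) - ((pw.getD count ' ').toNat : Int) - 32) 95).toNat

-- reference loop: the output characters in A's traversal order
def loopB (pw : List Char) : Nat → List Char → List Char
  | _, [] => []
  | count, c :: rest => decChar pw count c :: loopB pw ((count + 1) % pw.length) rest

theorem cascade_eq_mod (a b : Int) (ha : 32 ≤ a) (ha' : a ≤ 126) (hb : 0 ≤ b) (hb' : b ≤ 126) :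
    (if a - b < 32 then (if a - b + 95 < 32 then a - b + 95 + 95 else a - b + 95) else a - b)
      = 32 + PySem.Int.mod (a - b - 32) 95 := by
  rw [PySem.Int.mod_eq_emod_of_pos (by omega)]
  split_ifs <;> omega

theorem loopA_eq (pw : List Char) (hpw : pw ≠ [])
    (hok : ∀ c ∈ pw, (c.toNat : Int) ≤ 126) :
    ∀ (s : List Char) (count : Nat) (acc : List Char), count < pw.length →
    keyUnencodeLoop pw count acc s =
      if s.any (fun c => decide ((c.toNat : Int) > 126) || decide ((c.toNat : Int) < 32))
      then "Error" else String.mk (acc ++ loopB pw count s) := by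
  intro s
  induction s with
  | nil => intro count acc _; simp [keyUnencodeLoop, loopB]
  | cons c rest ih =>
    intro count acc hcount
    by_cases h1 : (c.toNat : Int) > 126
    · have h1' : 126 < c.toNat := by exact_mod_cast h1
      simp [keyUnencodeLoop, h1, h1']
    · by_cases h2 : (c.toNat : Int) < 32
      · have h2' : c.toNat < 32 := by exact_mod_cast h2
        simp [keyUnencodeLoop, h1, h2, h2']
      · have h1' : ¬ 126 < c.toNat := by omega
        have h2' : ¬ c.toNat < 32 := by omega
        have hmem : pw.getD count ' ' ∈ pw := by
          rw [List.getD_eq_getElem?_getD, List.getElem?_eq_getElem hcount]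
          exact List.getElem_mem _
        have hoff : ((pw.getD count ' ').toNat : Int) ≤ 126 := hok _ hmem
        have hstep : (if count + 1 = pw.length then 0 else count + 1) = (count + 1) % pw.length := by
          rcases Nat.lt_or_ge (count + 1) pw.length with h | h
          · simp [Nat.ne_of_lt h, Nat.mod_eq_of_lt h]
          · have : count + 1 = pw.length := by omega
            simp [this]
        have hlt : (count + 1) % pw.length < pw.length :=
          Nat.mod_lt _ (List.length_pos_iff.mpr hpw)
        simp only [keyUnencodeLoop, if_neg h1, if_neg h2, hstep, ih _ _ hlt]
        rw [cascade_eq_mod _ _ (by omega) (by omega) (by positivity) hoff]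
        simp [loopB, decChar, List.any_cons, h1', h2']

-- append-accumulator loop = map
theorem foldl_push_eq_map {α β : Type} (f : α → β) (l : List α) :
    l.foldl (fun acc p => acc ++ [f p]) [] = l.map f := by
  rw [PySem.List.foldl_append_eq_flatMap (fun p => [f p]) l [], List.nil_append]
  induction l with
  | nil => rfl
  | cons x xs ih => rw [List.flatMap_cons, List.map_cons, ih]; rfl

-- a table lookup is the reference per-character decode
theorem table_lookup_eq (pw : List Char) (hpw : pw ≠ []) (k : Nat) (c : Char)
    (hlo : 32 ≤ c.toNat) (hhi : c.toNat ≤ 126) :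
    PySem.List.pyGetD
      (PySem.List.pyGetD (pw.map bRow) (PySem.Int.mod (k : Int) ((pw.map bRow).length : Int)) [])
      ((c.toNat : Int) - 32) ' '
      = decChar pw (k % pw.length) c := by
  have hn : 0 < pw.length := List.length_pos_iff.mpr hpw
  have hj : k % pw.length < pw.length := Nat.mod_lt _ hn
  have h1 : PySem.List.pyGetD (pw.map bRow) (PySem.Int.mod (k : Int) ((pw.map bRow).length : Int)) []
      = bRow (pw.getD (k % pw.length) ' ') := by
    rw [List.length_map, PySem.Int.mod_natCast, PySem.List.pyGetD_natCast,
      List.getD_eq_getElem?_getD, List.getElem?_map, List.getElem?_eq_getElem hj,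
      List.getD_eq_getElem?_getD, List.getElem?_eq_getElem hj]
    rfl
  rw [h1]
  have hcast : ((c.toNat : Int) - 32) = ((c.toNat - 32 : Nat) : Int) := by omega
  rw [bRow, hcast,
    PySem.List.pyGetD_map_pyRange_one _ 32 127 (c.toNat - 32) ' ' (by omega)]
  have : (32 : Int) + ((c.toNat - 32 : Nat) : Int) = (c.toNat : Int) := by omega
  rw [this, decChar]

-- B's decode pass in A's traversal order
theorem mapB_eq_loopB (pw : List Char) (hpw : pw ≠ []) :
    ∀ (s : List Char) (k : Nat), (∀ c ∈ s, 32 ≤ c.toNat ∧ c.toNat ≤ 126) →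
    (PySem.List.enumerate s (k : Int)).map (fun p =>
        PySem.List.pyGetD
          (PySem.List.pyGetD (pw.map bRow) (PySem.Int.mod p.1 ((pw.map bRow).length : Int)) [])
          ((p.2.toNat : Int) - 32) ' ')
      = loopB pw (k % pw.length) s := by
  intro s
  induction s with
  | nil => intro k _; simp [PySem.List.enumerate_nil, loopB]
  | cons c rest ih =>
    intro k hval
    have hc := hval c (by simp)
    have hcast : ((k : Int) + 1) = ((k + 1 : Nat) : Int) := by push_cast; ring
    rw [PySem.List.enumerate_cons, List.map_cons, hcast,
      ih (k + 1) (fun c hcmem => hval c (by simp [hcmem]))]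
    have hstep : (k % pw.length + 1) % pw.length = (k + 1) % pw.length := by
      simp [Nat.add_mod]
    simp only [loopB, hstep, table_lookup_eq pw hpw k c hc.1 hc.2]

-- ===== VERDICT (by name: the statement is the Claim_ definition above) =====
set_option maxRecDepth 8000 in
theorem keyUnencode_spec : Claim_equal_keyUnencode := by
  unfold Claim_equal_keyUnencode
  intro s pw _ hpre
  unfold Spec_keyUnencode keyUnencode keyUnencode_alt
  by_cases hbad : (pw.toList.any fun c => decide ((c.toNat : Int) > 126)) = true
  · rw [if_pos hbad, if_pos hbad]
  · rw [if_neg hbad, if_neg hbad]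
    have hok : ∀ c ∈ pw.toList, (c.toNat : Int) ≤ 126 := by
      intro c hc
      have := (List.any_eq_false.mp (Bool.eq_false_iff.mpr hbad)) c hc
      simp at this; omega
    -- B's combined validation predicate equals A's two-branch one
    have hpredEq : ∀ c : Char,
        (!(decide ((32 : Int) ≤ (c.toNat : Int)) && decide ((c.toNat : Int) ≤ 126)))
          = (decide ((c.toNat : Int) > 126) || decide ((c.toNat : Int) < 32)) := by
      intro c
      by_cases h1 : (32 : Int) ≤ (c.toNat : Int) <;>
        by_cases h2 : (c.toNat : Int) ≤ 126 <;>
          simp [h1, h2] <;> omega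
    have hanyEq : (s.toList.any
        fun c => !(decide ((32 : Int) ≤ (c.toNat : Int)) && decide ((c.toNat : Int) ≤ 126)))
        = (s.toList.any fun c => decide ((c.toNat : Int) > 126) || decide ((c.toNat : Int) < 32)) := by
      rw [show (fun c : Char => !(decide ((32 : Int) ≤ (c.toNat : Int)) && decide ((c.toNat : Int) ≤ 126)))
        = (fun c : Char => decide ((c.toNat : Int) > 126) || decide ((c.toNat : Int) < 32)) from funext hpredEq]
    by_cases hpw : pw.toList = []
    · have hpw' : pw = "" := String.toList_eq_nil_iff.mp hpw
      rcases hpre with h | h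
      · exact absurd hpw' h
      · cases hs : s.toList with
        | nil => simp [keyUnencodeLoop, PySem.List.enumerate_nil]
        | cons c rest =>
          rw [hs] at h
          have hc : 126 < c.toNat ∨ c.toNat < 32 := by
            have := List.all_eq_true.mp h c (by simp)
            simpa using this
          have hanyT : ((c :: rest).any
              fun c => !(decide ((32 : Int) ≤ (c.toNat : Int)) && decide ((c.toNat : Int) ≤ 126))) = true := by
            rw [show (fun c : Char => !(decide ((32 : Int) ≤ (c.toNat : Int)) && decide ((c.toNat : Int) ≤ 126)))
              = (fun c : Char => decide ((c.toNat : Int) > 126) || decide ((c.toNat : Int) < 32)) from funext hpredEq]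
            simp
            omega
          rw [if_pos hanyT]
          rcases hc with hc | hc
          · have hcI : (c.toNat : Int) > 126 := by exact_mod_cast hc
            simp [keyUnencodeLoop, hcI]
          · have hcI : (c.toNat : Int) < 32 := by exact_mod_cast hc
            have h1' : ¬ ((c.toNat : Int) > 126) := by omega
            simp [keyUnencodeLoop, h1', hcI]
    · rw [loopA_eq pw.toList hpw hok s.toList 0 [] (List.length_pos_iff.mpr hpw)]
      by_cases hany : (s.toList.any
          fun c => decide ((c.toNat : Int) > 126) || decide ((c.toNat : Int) < 32)) = true
      · rw [if_pos hany, hanyEq, if_pos hany]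
      · rw [if_neg hany, hanyEq, if_neg hany, List.nil_append]
        have hval : ∀ c ∈ s.toList, 32 ≤ c.toNat ∧ c.toNat ≤ 126 := by
          intro c hc
          have := (List.any_eq_false.mp (Bool.eq_false_iff.mpr hany)) c hc
          simp at this
          omega
        rw [foldl_push_eq_map]
        have he := mapB_eq_loopB pw.toList hpw s.toList 0 hval
        simp only [Nat.cast_zero, Nat.zero_mod] at he
        rw [← he]
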